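-- pv_equiv track=rewrite | github.com/Arunava800/DSA_MachineLearning | Introduction to python/2DArrays/LargestRowOrColumn.py | maximum_columns
-- ===== SOURCE A (Python) =====
-- def maximum_columns(mat, n_row, m_col):
--     maximum = -2147483648
--     temp = 0
--     for cols in range(m_col):
--         addition = 0
--         for row in range(n_row):
--             addition += mat[row][cols]
--             if maximum < addition:
--                 maximum = addition
--                 temp = cols
--     return maximum, temp
-- ===== SOURCE B (Python) =====
-- def maximum_columns(mat, n_row, m_col):
--     # Row-major sweep: keep per-column running sums and per-column best
--     # prefix sums as whole vectors, rebuilt with zip each row.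
--     sums = [0] * m_col
--     best = [None] * m_col
--     if sums:  # no columns -> nothing to accumulate
--         for r in range(n_row):
--             sums = [s + x for s, x in zip(sums, mat[r])]
--             best = [s if b is None or s > b else b for b, s in zip(best, sums)]
--     # Selection pass: earliest column strictly beating the sentinel chain.
--     maximum = -2147483648
--     temp = 0
--     for c in range(m_col):
--         b = best[c]
--         if b is not None and maximum < b:
--             maximum = b
--             temp = c
--     return maximum, temp
-- ===== Notes on version B (the rewrite author's own statement) =====
-- stated objective: alternative
-- what changed: B traverses the matrix row-major (A goes column-major), maintaining whole vectors of per-column running sums and per-column best prefix sums rebuilt by zip at each row, then selects the winning column in a separate final scan.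
import Mathlib
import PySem

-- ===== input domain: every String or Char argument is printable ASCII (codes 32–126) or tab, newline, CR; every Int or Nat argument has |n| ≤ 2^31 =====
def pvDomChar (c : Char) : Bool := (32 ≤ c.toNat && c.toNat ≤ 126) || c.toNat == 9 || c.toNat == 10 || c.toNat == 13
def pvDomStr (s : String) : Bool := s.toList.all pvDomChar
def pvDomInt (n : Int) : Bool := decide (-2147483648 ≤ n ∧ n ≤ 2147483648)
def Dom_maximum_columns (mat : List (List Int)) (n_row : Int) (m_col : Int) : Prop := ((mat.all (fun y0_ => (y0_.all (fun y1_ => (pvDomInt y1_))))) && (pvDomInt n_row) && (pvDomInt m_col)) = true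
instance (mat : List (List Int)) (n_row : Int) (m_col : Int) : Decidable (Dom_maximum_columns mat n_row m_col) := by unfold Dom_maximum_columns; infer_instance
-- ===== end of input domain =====

-- B traverses the matrix row-major with whole vectors of per-column running sums and
-- per-column bests rebuilt by zip, then selects in a final scan; A is a fused
-- column-major double loop.  Objective: alternative decomposition, same cost.

-- ===== PORT A =====
-- mat[row][cols] (indices are in range under Pre_)
def pvAt (mat : List (List Int)) (r c : Int) : Int :=
  PySem.List.pyGetD (PySem.List.pyGetD mat r []) c 0

-- body of A's inner loop, on state (maximum, temp, addition), given mat[row][cols] = x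
def pvStepA (c : Int) (s : Int × Int × Int) (x : Int) : Int × Int × Int :=
  let addition := s.2.2 + x
  if s.1 < addition then (addition, c, addition) else (s.1, s.2.1, addition)

def maximum_columns (mat : List (List Int)) (n_row : Int) (m_col : Int) : Int × Int :=
  (PySem.List.pyRange 0 m_col 1).foldl
    (fun st c =>
      let r := (PySem.List.pyRange 0 n_row 1).foldl
        (fun s row => pvStepA c s (pvAt mat row c)) (st.1, st.2, 0)
      (r.1, r.2.1))
    (-2147483648, 0)

-- ===== PORT B =====
-- one row of B: sums = [s + x for s, x in zip(sums, mat[r])];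
--               best = [s if b is None or s > b else b for b, s in zip(best, sums)]
def pvRowUpd (mat : List (List Int)) (st : List Int × List (Option Int)) (r : Int) :
    List Int × List (Option Int) :=
  let sums := List.zipWith (· + ·) st.1 (PySem.List.pyGetD mat r [])
  let best := List.zipWith
    (fun (b : Option Int) (s : Int) =>
      some (match b with | none => s | some bv => if s > bv then s else bv))
    st.2 sums
  (sums, best)

def maximum_columns_alt (mat : List (List Int)) (n_row : Int) (m_col : Int) : Int × Int :=
  let init := (List.replicate m_col.toNat (0 : Int), List.replicate m_col.toNat (none : Option Int))
  let fin := if m_col.toNat = 0 then init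
             else (PySem.List.pyRange 0 n_row 1).foldl (pvRowUpd mat) init
  (PySem.List.pyRange 0 m_col 1).foldl
    (fun st c =>
      match PySem.List.pyGetD fin.2 c none with
      | none => st
      | some b => if st.1 < b then (b, c) else st)
    (-2147483648, 0)

-- ===== PRECONDITION & SPEC =====
-- Pre_ excludes exactly the inputs where Python A raises IndexError: when both loops run,
-- every accessed row must exist and be at least m_col wide.
def Pre_maximum_columns (mat : List (List Int)) (n_row : Int) (m_col : Int) : Prop :=
  (0 < n_row ∧ 0 < m_col) →
    (n_row ≤ mat.length ∧ ∀ r ∈ mat.take n_row.toNat, m_col ≤ r.length)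
instance (mat : List (List Int)) (n_row : Int) (m_col : Int) : Decidable (Pre_maximum_columns mat n_row m_col) := by unfold Pre_maximum_columns; infer_instance

def pvWitness_maximum_columns : List (List Int) × Int × Int := ([[1, -2], [3, 4]], 2, 2)

def Spec_maximum_columns (mat : List (List Int)) (n_row : Int) (m_col : Int) (out : Int × Int) : Prop := out = maximum_columns_alt mat n_row m_col
instance (mat : List (List Int)) (n_row : Int) (m_col : Int) (out : Int × Int) : Decidable (Spec_maximum_columns mat n_row m_col out) := by unfold Spec_maximum_columns; infer_instance

-- ===== CLAIM (what is proved, stated in full; the proofs are below) =====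
def Claim_equal_maximum_columns : Prop := ∀ (mat : List (List Int)) (n_row : Int) (m_col : Int), Dom_maximum_columns mat n_row m_col → Pre_maximum_columns mat n_row m_col → Spec_maximum_columns mat n_row m_col (maximum_columns mat n_row m_col)

-- ===== LEMMAS AND PROOFS =====

-- proof-side scalar step: how one column's (running sum, best) pair evolves under one row
def pvStepB (s : Int × Option Int) (x : Int) : Int × Option Int :=
  (s.1 + x, some (match s.2 with | none => s.1 + x | some b => if s.1 + x > b then s.1 + x else b))

-- proof-side value: best prefix sum of column c, none when range(n_row) is empty
def pvBestCol (mat : List (List Int)) (n_row : Int) (c : Int) : Option Int :=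
  ((PySem.List.pyRange 0 n_row 1).foldl
    (fun s row => pvStepB s (pvAt mat row c)) (0, none)).2

-- one A-step from the "merged" state matches one scalar B-step's updated best
theorem pvStep_merge (c M t s bv x : Int) :
    pvStepA c (if M < bv then bv else M, (if M < bv then c else t), s) x
      = ((if M < (if s + x > bv then s + x else bv) then (if s + x > bv then s + x else bv) else M),
         (if M < (if s + x > bv then s + x else bv) then c else t), s + x) := by
  simp only [pvStepA]
  split_ifs <;> simp_all <;> omega

-- A's inner loop from (max M bv, tie-temp, s) tracks the scalar B loop from (s, some bv)
theorem pvKey (L : List Int) (c M t : Int) : ∀ (s bv : Int),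
    L.foldl (pvStepA c) ((if M < bv then bv else M), (if M < bv then c else t), s)
      = ((L.foldl pvStepB (s, some bv)).2.elim M (fun bv' => if M < bv' then bv' else M),
         (L.foldl pvStepB (s, some bv)).2.elim t (fun bv' => if M < bv' then c else t),
         (L.foldl pvStepB (s, some bv)).1) := by
  induction L with
  | nil => intro s bv; simp
  | cons x xs ih =>
    intro s bv
    have h1 : (x :: xs).foldl (pvStepA c)
        ((if M < bv then bv else M), (if M < bv then c else t), s)
        = xs.foldl (pvStepA c)
            ((if M < (if s + x > bv then s + x else bv) then (if s + x > bv then s + x else bv) else M),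
             (if M < (if s + x > bv then s + x else bv) then c else t), s + x) := by
      rw [List.foldl_cons, pvStep_merge]
    have h2 : (x :: xs).foldl pvStepB (s, some bv)
        = xs.foldl pvStepB (s + x, some (if s + x > bv then s + x else bv)) := by
      rfl
    rw [h1, h2, ih]

-- A's inner loop from (M, t, 0) versus the scalar B loop from (0, none)
theorem pvInner (L : List Int) (c M t : Int) :
    L.foldl (pvStepA c) (M, t, 0)
      = ((L.foldl pvStepB ((0 : Int), (none : Option Int))).2.elim M (fun bv => if M < bv then bv else M),
         (L.foldl pvStepB ((0 : Int), (none : Option Int))).2.elim t (fun bv => if M < bv then c else t),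
         (L.foldl pvStepB ((0 : Int), (none : Option Int))).1) := by
  cases L with
  | nil => simp
  | cons x xs =>
    have h1 : (x :: xs).foldl (pvStepA c) (M, t, 0)
        = xs.foldl (pvStepA c) ((if M < 0 + x then 0 + x else M), (if M < 0 + x then c else t), 0 + x) := by
      rw [List.foldl_cons]
      show xs.foldl (pvStepA c) (if M < 0 + x then ((0:Int) + x, c, 0 + x) else (M, t, 0 + x)) = _
      congr 1
      split_ifs <;> rfl
    have h2 : (x :: xs).foldl pvStepB ((0 : Int), (none : Option Int))
        = xs.foldl pvStepB (0 + x, some (0 + x)) := by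
      rfl
    rw [h1, h2, pvKey]

-- the scalar B fold is some whenever it starts some
theorem pvB_some (L : List Int) : ∀ (s bv : Int),
    ∃ bv', L.foldl pvStepB (s, some bv) = ((L.foldl pvStepB (s, some bv)).1, some bv') := by
  induction L with
  | nil => intro s bv; exact ⟨bv, rfl⟩
  | cons x xs ih =>
    intro s bv
    simpa [List.foldl_cons, pvStepB] using ih (s + x) (if s + x > bv then s + x else bv)

-- with no rows, A's outer loop never changes its state
theorem pvOuter_id : ∀ (L : List Int) (st : Int × Int),
    L.foldl (fun (st : Int × Int) (_ : Int) => (((st.1, st.2, (0:Int))).1, ((st.1, st.2, (0:Int))).2.1)) st = st := by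
  intro L
  induction L with
  | nil => intro st; rfl
  | cons y ys ih => intro st; exact ih st

-- the fused outer loop of A equals the selection scan over the per-column bests
theorem pvOuter (mat : List (List Int)) (n_row : Int) (f : Int → Int)
    (hsome : ∀ c, pvBestCol mat n_row c = some (f c)) :
    ∀ (L : List Int) (st : Int × Int),
      L.foldl (fun st c =>
          (((PySem.List.pyRange 0 n_row 1).foldl
              (fun s row => pvStepA c s (pvAt mat row c)) (st.1, st.2, 0)).1,
           ((PySem.List.pyRange 0 n_row 1).foldl
              (fun s row => pvStepA c s (pvAt mat row c)) (st.1, st.2, 0)).2.1)) st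
        = L.foldl (fun st c => if st.1 < f c then (f c, c) else st) st := by
  intro L
  induction L with
  | nil => intro st; rfl
  | cons c cs ih =>
    intro st
    have hinner : (PySem.List.pyRange 0 n_row 1).foldl
        (fun s row => pvStepA c s (pvAt mat row c)) (st.1, st.2, 0)
        = ((if st.1 < f c then f c else st.1), (if st.1 < f c then c else st.2),
           (((PySem.List.pyRange 0 n_row 1).map (fun row => pvAt mat row c)).foldl pvStepB ((0:Int), (none : Option Int))).1) := by
      rw [← List.foldl_map (f := fun row => pvAt mat row c) (g := pvStepA c), pvInner]
      have hb : (((PySem.List.pyRange 0 n_row 1).map (fun row => pvAt mat row c)).foldl pvStepB ((0:Int), (none : Option Int))).2 = some (f c) := by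
        have h := hsome c
        unfold pvBestCol at h
        rw [← List.foldl_map (f := fun row => pvAt mat row c) (g := pvStepB)] at h
        exact h
      rw [hb]
      rfl
    rw [List.foldl_cons, List.foldl_cons, hinner, ih]
    congr 1
    by_cases h : st.1 < f c <;> simp [h]

-- B's vector row-fold, read at a fixed column c, is the scalar B fold over that column
theorem pvZipFold (mat : List (List Int)) (m : Nat) :
    ∀ (L : List Int) (sums : List Int) (best : List (Option Int)),
      sums.length = m → best.length = m →
      (∀ r ∈ L, m ≤ (PySem.List.pyGetD mat r []).length) →
      (L.foldl (pvRowUpd mat) (sums, best)).1.length = m ∧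
      (L.foldl (pvRowUpd mat) (sums, best)).2.length = m ∧
      ∀ c : Nat, c < m →
        ((L.foldl (pvRowUpd mat) (sums, best)).1.getD c 0,
         (L.foldl (pvRowUpd mat) (sums, best)).2.getD c none)
        = (L.map (fun r => (PySem.List.pyGetD mat r []).getD c 0)).foldl pvStepB
            (sums.getD c 0, best.getD c none) := by
  intro L
  induction L with
  | nil => intro sums best hs hb _; exact ⟨hs, hb, fun c _ => rfl⟩
  | cons r rs ih =>
    intro sums best hs hb hrow
    have hrlen : m ≤ (PySem.List.pyGetD mat r []).length := hrow r (List.mem_cons_self)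
    have hslen : (List.zipWith (· + ·) sums (PySem.List.pyGetD mat r [])).length = m := by
      simp [List.length_zipWith, hs]; omega
    have hblen : (List.zipWith
        (fun (b : Option Int) (s : Int) =>
          some (match b with | none => s | some bv => if s > bv then s else bv))
        best (List.zipWith (· + ·) sums (PySem.List.pyGetD mat r []))).length = m := by
      simp [List.length_zipWith, hb, hslen]
    obtain ⟨h1, h2, h3⟩ := ih _ _ hslen hblen (fun r' hr' => hrow r' (List.mem_cons_of_mem _ hr'))
    refine ⟨by simpa [pvRowUpd] using h1, by simpa [pvRowUpd] using h2, ?_⟩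
    intro c hc
    have hcs : c < sums.length := by omega
    have hcb : c < best.length := by omega
    have hcr : c < (PySem.List.pyGetD mat r []).length := by omega
    have hgs : (List.zipWith (· + ·) sums (PySem.List.pyGetD mat r [])).getD c 0
        = sums.getD c 0 + (PySem.List.pyGetD mat r []).getD c 0 := by
      rw [List.getD_eq_getElem _ _ (by omega), List.getD_eq_getElem _ _ hcs,
          List.getD_eq_getElem _ _ hcr, List.getElem_zipWith]
    have hgb : (List.zipWith
        (fun (b : Option Int) (s : Int) =>
          some (match b with | none => s | some bv => if s > bv then s else bv))
        best (List.zipWith (· + ·) sums (PySem.List.pyGetD mat r []))).getD c none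
        = some (match best.getD c none with
                | none => sums.getD c 0 + (PySem.List.pyGetD mat r []).getD c 0
                | some bv => if sums.getD c 0 + (PySem.List.pyGetD mat r []).getD c 0 > bv
                             then sums.getD c 0 + (PySem.List.pyGetD mat r []).getD c 0 else bv) := by
      rw [List.getD_eq_getElem _ _ (by omega), List.getElem_zipWith,
          ← List.getD_eq_getElem best none hcb, ← List.getD_eq_getElem _ (0:Int) (by omega), hgs]
    have hstep : (pvStepB (sums.getD c 0, best.getD c none)
        ((PySem.List.pyGetD mat r []).getD c 0))
        = ((List.zipWith (· + ·) sums (PySem.List.pyGetD mat r [])).getD c 0,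
           (List.zipWith
            (fun (b : Option Int) (s : Int) =>
              some (match b with | none => s | some bv => if s > bv then s else bv))
            best (List.zipWith (· + ·) sums (PySem.List.pyGetD mat r []))).getD c none) := by
      rw [hgs, hgb]; rfl
    have hfold : ((r :: rs).foldl (pvRowUpd mat) (sums, best))
        = rs.foldl (pvRowUpd mat)
            (List.zipWith (· + ·) sums (PySem.List.pyGetD mat r []),
             List.zipWith
              (fun (b : Option Int) (s : Int) =>
                some (match b with | none => s | some bv => if s > bv then s else bv))
              best (List.zipWith (· + ·) sums (PySem.List.pyGetD mat r []))) := rfl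
    rw [hfold, h3 c hc, List.map_cons, List.foldl_cons, hstep]

-- ===== VERDICT (by name: the statement is the Claim_ definition above) =====
theorem maximum_columns_spec : Claim_equal_maximum_columns := by
  intro mat n_row m_col _ hpre
  unfold Spec_maximum_columns
  simp only [maximum_columns, maximum_columns_alt]
  by_cases hm : m_col ≤ 0
  · -- no columns: both folds are over the empty range
    rw [PySem.List.pyRange_one_eq_nil (b := m_col) (by omega)]
    rfl
  by_cases hn : n_row ≤ 0
  · -- no rows: A's inner loop is empty, B's best table is all None
    have hr : PySem.List.pyRange 0 n_row 1 = [] := PySem.List.pyRange_one_eq_nil (by omega)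
    rw [hr, if_neg (show ¬ m_col.toNat = 0 by omega)]
    simp only [List.foldl_nil]
    have hlook : ∀ c : Int,
        PySem.List.pyGetD (List.replicate m_col.toNat (none : Option Int)) c none = none := by
      intro c
      by_cases hin : PySem.Raise.InRange (List.replicate m_col.toNat (none : Option Int)).length c
      · have := PySem.List.pyGetD_mem (xs := List.replicate m_col.toNat (none : Option Int))
          (i := c) (d := none) hin
        exact List.eq_of_mem_replicate this
      · exact PySem.List.pyGetD_of_none _ _ _ ((PySem.List.pyGet?_eq_none_iff _ _).mpr hin)
    have hR : List.foldl
        (fun (st : Int × Int) (c : Int) =>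
          match PySem.List.pyGetD (List.replicate m_col.toNat (none : Option Int)) c none with
          | none => st | some b => if st.1 < b then (b, c) else st)
        (-2147483648, 0) (PySem.List.pyRange 0 m_col 1)
        = ((-2147483648 : Int), (0 : Int)) :=
      (PySem.List.foldl_congr_mem _ _ (fun (st : Int × Int) (_ : Int) => st) _
        (fun acc c _ => by rw [hlook c])).trans (List.foldl_fixed _)
    exact (pvOuter_id (PySem.List.pyRange 0 m_col 1) (-2147483648, 0)).trans hR.symm
  · -- at least one row and one column
    rw [if_neg (show ¬ m_col.toNat = 0 by omega)]
    obtain ⟨hlen, hwid⟩ := hpre ⟨by omega, by omega⟩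
    obtain ⟨x, xs, hx⟩ : ∃ x xs, PySem.List.pyRange 0 n_row 1 = x :: xs := by
      rcases h : PySem.List.pyRange 0 n_row 1 with _ | ⟨x, xs⟩
      · exfalso
        have hl := PySem.List.length_pyRange_one (a := 0) (b := n_row)
        rw [h] at hl; simp at hl; omega
      · exact ⟨x, xs, rfl⟩
    set f : Int → Int := fun c => (pvBestCol mat n_row c).getD 0 with hf
    have hsome : ∀ c, pvBestCol mat n_row c = some (f c) := by
      intro c
      have hS : (pvBestCol mat n_row c).isSome := by
        unfold pvBestCol
        rw [← List.foldl_map (f := fun row => pvAt mat row c) (g := pvStepB), hx, List.map_cons, List.foldl_cons]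
        obtain ⟨bv', hbv⟩ := pvB_some (xs.map (fun row => pvAt mat row c)) (0 + pvAt mat x c) (0 + pvAt mat x c)
        rw [show pvStepB ((0:Int), (none : Option Int)) (pvAt mat x c)
              = (0 + pvAt mat x c, some (0 + pvAt mat x c)) from rfl]
        rw [hbv]
        rfl
      cases hres : pvBestCol mat n_row c with
      | none => rw [hres] at hS; simp at hS
      | some b => simp [hf, hres]
    -- the per-row facts needed by the vector fold
    have hrowlen : ∀ r ∈ PySem.List.pyRange 0 n_row 1,
        m_col.toNat ≤ (PySem.List.pyGetD mat r []).length := by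
      intro r hr
      rw [PySem.List.mem_pyRange_one] at hr
      have hget : PySem.List.pyGetD mat r [] = mat[r.toNat]'(by omega) :=
        PySem.List.pyGetD_eq_getElem mat [] (by omega) (by omega)
      have hmem : mat[r.toNat]'(by omega) ∈ mat.take n_row.toNat := by
        apply List.mem_take_iff_getElem.mpr
        exact ⟨r.toNat, by omega, rfl⟩
      have := hwid _ hmem
      rw [hget]; omega
    obtain ⟨hL1, hL2, hL3⟩ := pvZipFold mat m_col.toNat (PySem.List.pyRange 0 n_row 1)
      (List.replicate m_col.toNat (0 : Int)) (List.replicate m_col.toNat (none : Option Int))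
      (by simp) (by simp) hrowlen
    -- the lookup in B's final table, for columns of the range
    have hlook : ∀ c ∈ PySem.List.pyRange 0 m_col 1,
        PySem.List.pyGetD
          (((PySem.List.pyRange 0 n_row 1).foldl (pvRowUpd mat)
            (List.replicate m_col.toNat (0 : Int), List.replicate m_col.toNat (none : Option Int))).2)
          c none = some (f c) := by
      intro c hc
      rw [PySem.List.mem_pyRange_one] at hc
      have hcm : c.toNat < m_col.toNat := by omega
      have hcol := hL3 c.toNat hcm
      have hmapeq : ((PySem.List.pyRange 0 n_row 1).map
            (fun r => (PySem.List.pyGetD mat r []).getD c.toNat 0))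
          = (PySem.List.pyRange 0 n_row 1).map (fun r => pvAt mat r c) := by
        apply List.map_congr_left
        intro r hr
        have hrl := hrowlen r hr
        rw [PySem.List.mem_pyRange_one] at hr
        unfold pvAt
        rw [PySem.List.pyGetD_eq_getElem (PySem.List.pyGetD mat r []) 0 (by omega) (by omega),
            List.getD_eq_getElem _ _ (by omega)]
      have hval : (((PySem.List.pyRange 0 n_row 1).foldl (pvRowUpd mat)
          (List.replicate m_col.toNat (0 : Int), List.replicate m_col.toNat (none : Option Int))).2).getD c.toNat none
          = pvBestCol mat n_row c := by
        have : (Prod.mk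
            ((((PySem.List.pyRange 0 n_row 1).foldl (pvRowUpd mat)
              (List.replicate m_col.toNat (0 : Int), List.replicate m_col.toNat (none : Option Int))).1).getD c.toNat 0)
            ((((PySem.List.pyRange 0 n_row 1).foldl (pvRowUpd mat)
              (List.replicate m_col.toNat (0 : Int), List.replicate m_col.toNat (none : Option Int))).2).getD c.toNat none)).2
            = pvBestCol mat n_row c := by
          rw [hcol]
          rw [List.getD_replicate (h := hcm), List.getD_replicate (h := hcm)]
          rw [hmapeq]
          unfold pvBestCol
          rw [← List.foldl_map (f := fun row => pvAt mat row c) (g := pvStepB)]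
        simpa using this
      have hc0 : c = (c.toNat : Int) := by omega
      have hcast : PySem.List.pyGetD
          (((PySem.List.pyRange 0 n_row 1).foldl (pvRowUpd mat)
            (List.replicate m_col.toNat (0 : Int), List.replicate m_col.toNat (none : Option Int))).2)
          c none
          = (((PySem.List.pyRange 0 n_row 1).foldl (pvRowUpd mat)
            (List.replicate m_col.toNat (0 : Int), List.replicate m_col.toNat (none : Option Int))).2).getD c.toNat none := by
        rw [hc0, PySem.List.pyGetD_natCast, Int.toNat_natCast]
      rw [hcast, hval]
      exact hsome c
    -- both sides reduce to the same selection scan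
    rw [pvOuter mat n_row f hsome (PySem.List.pyRange 0 m_col 1) (-2147483648, 0)]
    exact (PySem.List.foldl_congr_mem _ _ _ _ (fun acc c hc => by rw [hlook c hc])).symm
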